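-- pv_equiv track=rewrite | github.com/huggingface/finepdfs | ablations/tokenization/tk_thom.py | _find_best_split_point
-- ===== SOURCE A (Python) =====
-- def _find_best_split_point(text: str, max_chars: int) -> int:
--     """Find the best point to split text within max_chars limit."""
--     if len(text) <= max_chars:
--         return len(text)
--
--     # Try splitting on double newlines first
--     double_newline_splits = []
--     pos = 0
--     while pos < max_chars:
--         pos = text.find('\n\n', pos)
--         if pos == -1 or pos >= max_chars:
--             break
--         double_newline_splits.append(pos + 2)  # Include the \n\n
--         pos += 2
--
--     if double_newline_splits:
--         return double_newline_splits[-1]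
--
--     # Try splitting on single newlines
--     single_newline_splits = []
--     pos = 0
--     while pos < max_chars:
--         pos = text.find('\n', pos)
--         if pos == -1 or pos >= max_chars:
--             break
--         single_newline_splits.append(pos + 1)  # Include the \n
--         pos += 1
--
--     if single_newline_splits:
--         return single_newline_splits[-1]
--
--     # Try splitting on sentence boundaries
--     sentence_splits = []
--     pos = 0
--     while pos < max_chars:
--         pos = text.find('. ', pos)
--         if pos == -1 or pos >= max_chars:
--             break
--         sentence_splits.append(pos + 2)  # Include the '. '
--         pos += 2
--
--     if sentence_splits:
--         return sentence_splits[-1]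
--
--     # Last resort: split at word boundaries
--     last_space = text.rfind(' ', 0, max_chars)
--     if last_space > 0:
--         return last_space + 1
--
--     # Absolute last resort: hard split at character limit
--     return max_chars
-- ===== SOURCE B (Python) =====
-- def _find_best_split_point(text: str, max_chars: int) -> int:
--     """One left-to-right pass recording the last candidate of each kind, then pick by priority."""
--     n = len(text)
--     if n <= max_chars:
--         return n
--     last_dn = -1   # last greedy non-overlapping '\n\n' start before max_chars
--     last_nl = -1   # last '\n' before max_chars
--     last_dot = -1  # last '. ' start before max_chars
--     skip = False   # current char is the consumed second '\n' of a matched pair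
--     for i in range(min(n, max(0, max_chars))):
--         c = text[i]
--         if c == '\n':
--             last_nl = i
--             if skip:
--                 skip = False
--             elif i + 1 < n and text[i + 1] == '\n':
--                 last_dn = i
--                 skip = True
--         else:
--             skip = False
--             if c == '.' and i + 1 < n and text[i + 1] == ' ':
--                 last_dot = i
--     if last_dn != -1:
--         return last_dn + 2
--     if last_nl != -1:
--         return last_nl + 1
--     if last_dot != -1:
--         return last_dot + 2
--     last_space = text.rfind(' ', 0, max_chars)
--     if last_space > 0:
--         return last_space + 1
--     return max_chars
-- ===== Notes on version B (the rewrite author's own statement) =====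
-- stated objective: alternative
-- what changed: Replaces the three sequential find-loop-and-append-to-list passes by a single left-to-right character scan that records the last candidate of each delimiter kind (with a skip flag reproducing non-overlapping '\n\n' matching) and then picks by priority.
import Mathlib
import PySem

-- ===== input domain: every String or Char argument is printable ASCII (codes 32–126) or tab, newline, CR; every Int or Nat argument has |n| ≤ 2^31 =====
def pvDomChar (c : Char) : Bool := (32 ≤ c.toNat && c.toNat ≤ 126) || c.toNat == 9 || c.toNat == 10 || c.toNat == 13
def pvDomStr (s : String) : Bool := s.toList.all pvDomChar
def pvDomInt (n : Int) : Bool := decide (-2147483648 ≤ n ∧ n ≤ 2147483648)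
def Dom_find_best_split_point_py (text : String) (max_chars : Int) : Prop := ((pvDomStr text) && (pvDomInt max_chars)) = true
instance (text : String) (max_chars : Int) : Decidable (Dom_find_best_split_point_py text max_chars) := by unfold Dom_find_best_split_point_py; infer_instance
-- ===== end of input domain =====

-- B replaces A's three sequential find-loop-collect-into-list passes by a single left-to-right
-- character scan recording the last candidate of each delimiter kind, then picks by priority.

-- ===== PORT A =====
-- one of A's three identical 'while pos < max_chars: pos = text.find(sub, pos); …' loops
-- (sub and step = len(sub) parametrize it); fuel bounds the iteration count (pos strictly grows)
def pvFindLoop (text : String) (max_chars : Int) (sub : String) (step : Int) :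
    Nat → Int → List Int → List Int
  | 0, _, acc => acc
  | fuel + 1, pos, acc =>
    if pos < max_chars then
      let p := PySem.Str.findFrom text sub pos
      if p = -1 ∨ max_chars ≤ p then acc
      else pvFindLoop text max_chars sub step fuel (p + step) (acc ++ [p + step])
    else acc

def find_best_split_point_py (text : String) (max_chars : Int) : Int :=
  if PySem.Str.len text ≤ max_chars then PySem.Str.len text
  else
    -- 'if splits: return splits[-1]' = match on getLast?
    match (pvFindLoop text max_chars "\n\n" 2 (max_chars.toNat + 1) 0 []).getLast? with
    | some v => v
    | none =>
      match (pvFindLoop text max_chars "\n" 1 (max_chars.toNat + 1) 0 []).getLast? with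
      | some v => v
      | none =>
        match (pvFindLoop text max_chars ". " 2 (max_chars.toNat + 1) 0 []).getLast? with
        | some v => v
        | none =>
          let last_space := PySem.Str.rfindFrom text " " 0 (some max_chars)
          if 0 < last_space then last_space + 1 else max_chars

-- ===== PORT B =====
-- the body of B's single for-loop; state = (last_dn, last_nl, last_dot, skip);
-- text[i] is in range for every i the loop visits, so 'none' is unreachable there;
-- 'i + 1 < n and text[i+1] == c' is exactly cs[i+1]? = some c
def pvScanStep (cs : List Char) (s : Int × Int × Int × Bool) (i : Nat) : Int × Int × Int × Bool :=
  match cs[i]? with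
  | none => s
  | some c =>
    if c = '\n' then
      if s.2.2.2 then (s.1, (i : Int), s.2.2.1, false)
      else if cs[i+1]? = some '\n' then ((i : Int), (i : Int), s.2.2.1, true)
      else (s.1, (i : Int), s.2.2.1, false)
    else
      if c = '.' ∧ cs[i+1]? = some ' ' then (s.1, s.2.1, (i : Int), false)
      else (s.1, s.2.1, s.2.2.1, false)

def find_best_split_point_py_alt (text : String) (max_chars : Int) : Int :=
  let cs := text.toList
  let n : Int := cs.length
  if n ≤ max_chars then n
  else
    -- range(min(n, max(0, max_chars))): a nonnegative bound, so List.range is exact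
    let L : Nat := min cs.length (max 0 max_chars).toNat
    let st := (List.range L).foldl (pvScanStep cs) (-1, -1, -1, false)
    if st.1 ≠ -1 then st.1 + 2
    else if st.2.1 ≠ -1 then st.2.1 + 1
    else if st.2.2.1 ≠ -1 then st.2.2.1 + 2
    else
      let last_space := PySem.Str.rfindFrom text " " 0 (some max_chars)
      if 0 < last_space then last_space + 1 else max_chars

-- ===== PRECONDITION & SPEC =====
def Spec_find_best_split_point_py (text : String) (max_chars : Int) (out : Int) : Prop := out = find_best_split_point_py_alt text max_chars
instance (text : String) (max_chars : Int) (out : Int) : Decidable (Spec_find_best_split_point_py text max_chars out) := by unfold Spec_find_best_split_point_py; infer_instance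

-- ===== CLAIM (what is proved, stated in full; the proofs are below) =====
def Claim_equal_find_best_split_point_py : Prop := ∀ (text : String) (max_chars : Int), Dom_find_best_split_point_py text max_chars → Spec_find_best_split_point_py text max_chars (find_best_split_point_py text max_chars)

-- ===== LEMMAS AND PROOFS =====

-- projections of B's scan state: (dn, skip) pair, nl, dot evolve independently
def pvDnStep (cs : List Char) (s : Int × Bool) (i : Nat) : Int × Bool :=
  match cs[i]? with
  | none => s
  | some c =>
    if c = '\n' then
      if s.2 then (s.1, false)
      else if cs[i+1]? = some '\n' then ((i : Int), true)
      else (s.1, false)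
    else (s.1, false)

def pvNlStep (cs : List Char) (a : Int) (i : Nat) : Int :=
  if cs[i]? = some '\n' then (i : Int) else a

def pvDotStep (cs : List Char) (a : Int) (i : Nat) : Int :=
  if cs[i]? = some '.' ∧ cs[i+1]? = some ' ' then (i : Int) else a

theorem pvScan_proj (cs : List Char) (l : List Nat) :
    ∀ (dn nl dot : Int) (sk : Bool),
    l.foldl (pvScanStep cs) (dn, nl, dot, sk) =
      ((l.foldl (pvDnStep cs) (dn, sk)).1, l.foldl (pvNlStep cs) nl,
        l.foldl (pvDotStep cs) dot, (l.foldl (pvDnStep cs) (dn, sk)).2) := by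
  induction l with
  | nil => intro dn nl dot sk; rfl
  | cons i t ih =>
    intro dn nl dot sk
    simp only [List.foldl_cons]
    rw [show pvScanStep cs (dn, nl, dot, sk) i =
      ((pvDnStep cs (dn, sk) i).1, pvNlStep cs nl i, pvDotStep cs dot i,
        (pvDnStep cs (dn, sk) i).2) from ?_, ih]
    unfold pvScanStep pvDnStep pvNlStep pvDotStep
    rcases h : cs[i]? with _ | c
    · simp
    · simp only
      by_cases hc : c = '\n'
      · subst hc
        by_cases hsk : sk <;> by_cases hp : cs[i+1]? = some '\n' <;> simp [hsk, hp]
      · have hnl : ¬ (cs[i]? = some '\n') := by simp [h, hc]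
        by_cases hd : c = '.' ∧ cs[i+1]? = some ' '
        · simp [hc, hd, h, hnl, hd.1]
        · have hdot : ¬ (cs[i]? = some '.' ∧ cs[i+1]? = some ' ') := by
            intro hx
            exact hd ⟨by simpa [h] using hx.1, hx.2⟩
          simp [hc, hd, hnl, hdot]

-- prefix-at-an-index bridges
theorem pvPrefix_one (cs : List Char) (i : Nat) (a : Char) :
    [a] <+: cs.drop i ↔ cs[i]? = some a := by
  rw [List.prefix_iff_getElem?]
  constructor
  · intro h
    have := h 0 (by simp)
    simpa [List.getElem?_drop] using this
  · intro h i' hi'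
    simp only [List.length_cons, List.length_nil] at hi'
    have : i' = 0 := by omega
    subst this
    simpa [List.getElem?_drop] using h

theorem pvPrefix_two (cs : List Char) (i : Nat) (a b : Char) :
    [a, b] <+: cs.drop i ↔ cs[i]? = some a ∧ cs[i+1]? = some b := by
  rw [List.prefix_iff_getElem?]
  constructor
  · intro h
    refine ⟨?_, ?_⟩
    · have := h 0 (by simp); simpa [List.getElem?_drop] using this
    · have := h 1 (by simp); simpa [List.getElem?_drop] using this
  · rintro ⟨h0, h1⟩ i' hi'
    simp only [List.length_cons, List.length_nil] at hi'
    have : i' = 0 ∨ i' = 1 := by omega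
    rcases this with rfl | rfl <;> simp [List.getElem?_drop, h0, h1]

-- no-occurrence intervals leave the projected states unchanged
theorem pvDn_noop (cs : List Char) (l : List Nat) (d : Int)
    (h : ∀ i ∈ l, ¬ (cs[i]? = some '\n' ∧ cs[i+1]? = some '\n')) :
    l.foldl (pvDnStep cs) (d, false) = (d, false) := by
  induction l with
  | nil => rfl
  | cons i t ih =>
    have hi := h i (by simp)
    have hstep : pvDnStep cs (d, false) i = (d, false) := by
      unfold pvDnStep
      rcases hc : cs[i]? with _ | c
      · rfl
      · simp only
        by_cases hn : c = '\n'
        · subst hn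
          have : ¬ cs[i+1]? = some '\n' := fun hp => hi ⟨hc, hp⟩
          simp [this]
        · simp [hn]
    simp [List.foldl_cons, hstep, ih (fun j hj => h j (by simp [hj]))]

theorem pvNl_noop (cs : List Char) (l : List Nat) (a : Int)
    (h : ∀ i ∈ l, ¬ cs[i]? = some '\n') :
    l.foldl (pvNlStep cs) a = a := by
  induction l with
  | nil => rfl
  | cons i t ih =>
    have hi := h i (by simp)
    simp [List.foldl_cons, pvNlStep, hi, ih (fun j hj => h j (by simp [hj]))]

theorem pvDot_noop (cs : List Char) (l : List Nat) (a : Int)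
    (h : ∀ i ∈ l, ¬ (cs[i]? = some '.' ∧ cs[i+1]? = some ' ')) :
    l.foldl (pvDotStep cs) a = a := by
  induction l with
  | nil => rfl
  | cons i t ih =>
    have hi := h i (by simp)
    simp [List.foldl_cons, pvDotStep, hi, ih (fun j hj => h j (by simp [hj]))]

-- splitting an index interval
theorem pvRange'_split (a c b : Nat) (hac : a ≤ c) (hcb : c ≤ b) :
    List.range' a (b - a) = List.range' a (c - a) ++ List.range' c (b - c) := by
  have := @List.range'_append a (c - a) (b - c) 1
  simp only [one_mul] at this
  rw [show a + (c - a) = c by omega] at this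
  rw [this]
  congr 1
  omega

-- the loop result is the accumulator plus the fresh matches
theorem pvFindLoop_acc (text : String) (mc : Int) (sub : String) (step : Int) :
    ∀ (fuel : Nat) (pos : Int) (acc : List Int),
    pvFindLoop text mc sub step fuel pos acc = acc ++ pvFindLoop text mc sub step fuel pos [] := by
  intro fuel
  induction fuel with
  | zero => intro pos acc; simp [pvFindLoop]
  | succ n ih =>
    intro pos acc
    simp only [pvFindLoop]
    split
    · split
      · simp
      · rw [ih _ (acc ++ _), ih _ ([] ++ _)]
        simp
    · simp

-- infix of a tail ⇒ some index carries a prefix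
theorem pvNoInfix (cs sub : List Char) (k : Nat) (hno : ¬ sub <:+: cs.drop k) :
    ∀ i, k ≤ i → ¬ sub <+: cs.drop i := by
  intro i hki hpre
  apply hno
  rw [List.infix_iff_prefix_suffix]
  refine ⟨cs.drop i, hpre, ?_⟩
  have : cs.drop i = (cs.drop k).drop (i - k) := by
    rw [List.drop_drop]; congr 1; omega
  rw [this]
  exact List.drop_suffix _ _

-- ===== MAIN LOOP LEMMAS =====
-- Each of A's find-loops computes (as last element) the same index B's scan stores.

theorem pvDn_main (text : String) (mc : Int) :
    ∀ (fuel : Nat) (p : Nat) (d : Int), p ≤ text.toList.length → (mc - p).toNat < fuel →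
    ((List.range' p (min text.toList.length (max 0 mc).toNat - p)).foldl
        (pvDnStep text.toList) (d, false)).1
      = (match (pvFindLoop text mc "\n\n" 2 fuel (p : Int) []).getLast? with
          | some v => v - 2 | none => d)
    ∧ (∀ v, (pvFindLoop text mc "\n\n" 2 fuel (p : Int) []).getLast? = some v → 2 ≤ v) := by
  intro fuel
  induction fuel with
  | zero => intro p d _ hf; omega
  | succ fuel ih =>
    intro p d hk hfuel
    set cs := text.toList with hcs
    set L := min cs.length (max 0 mc).toNat with hL
    have hLle : (L : Int) ≤ max 0 mc := by
      have : L ≤ (max 0 mc).toNat := Nat.min_le_right _ _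
      omega
    clear_value L
    simp only [pvFindLoop]
    by_cases hpm : (p : Int) < mc
    · simp only [hpm, if_true]
      simp only [PySem.Str.findFrom_eq, (by decide : "\n\n".toList = ['\n', '\n']), ← hcs]
      by_cases hf : PySem.Chars.findFrom cs ['\n', '\n'] (p : Int) none = -1
      · have hno := (PySem.Chars.findFrom_natCast_eq_neg_one_iff cs ['\n', '\n'] p hk).mp hf
        have hnoop : (List.range' p (L - p)).foldl (pvDnStep cs) (d, false) = (d, false) := by
          apply pvDn_noop
          intro i hi
          have hmem := (List.mem_range'_1).mp hi
          have := pvNoInfix cs ['\n', '\n'] p hno i hmem.1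
          rw [pvPrefix_two] at this
          exact this
        simp [hf, hnoop]
      · obtain ⟨hpf, hpre, hmin⟩ := PySem.Chars.findFrom_natCast_spec cs ['\n', '\n'] p hk hf
        set f := PySem.Chars.findFrom cs ['\n', '\n'] (p : Int) none with hfdef
        have hf0 : 0 ≤ f := le_trans (by omega) hpf
        have hfq : f = (f.toNat : Int) := (Int.toNat_of_nonneg hf0).symm
        set q := f.toNat with hq
        have hqval : (q : Int) = f := by rw [hq]; omega
        clear_value q f
        have hpq : p ≤ q := by omega
        have hcq := (pvPrefix_two cs q '\n' '\n').mp hpre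
        have hq1len : q + 1 < cs.length := by
          rcases List.getElem?_eq_some_iff.mp hcq.2 with ⟨h, _⟩; exact h
        by_cases hfm : mc ≤ f
        · have hnoop : (List.range' p (L - p)).foldl (pvDnStep cs) (d, false) = (d, false) := by
            apply pvDn_noop
            intro i hi
            have hmem := (List.mem_range'_1).mp hi
            have := hmin i hmem.1 (by omega)
            rw [pvPrefix_two] at this
            exact this
          simp [hf, hfm, hnoop]
        · -- a match at q < mc: record it, consume both characters, recurse from q + 2
          have hqm : (q : Int) < mc := by omega
          have hqL : q < L := by omega
          have hsplit : List.range' p (L - p)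
              = List.range' p (q - p) ++ List.range' q (L - q) :=
            pvRange'_split p q L hpq (by omega)
          have hnoop : (List.range' p (q - p)).foldl (pvDnStep cs) (d, false) = (d, false) := by
            apply pvDn_noop
            intro i hi
            have hmem := (List.mem_range'_1).mp hi
            have := hmin i hmem.1 (by omega)
            rw [pvPrefix_two] at this
            exact this
          have hstep : List.range' q (L - q) = q :: List.range' (q+1) (L - (q+1)) := by
            obtain ⟨n, hn⟩ : ∃ n, L - q = n + 1 := ⟨L - q - 1, by omega⟩
            rw [hn]
            have hn' : n = L - (q+1) := by omega
            rw [hn', List.range'_succ]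
          -- the second '\n' of the matched pair is consumed: the skip flag makes it a no-op
          have hskip : ((List.range' (q+1) (L - (q+1))).foldl (pvDnStep cs) ((q : Int), true)).1
              = ((List.range' (q+2) (L - (q+2))).foldl (pvDnStep cs) ((q : Int), false)).1 := by
            by_cases h1 : q + 1 < L
            · have : List.range' (q+1) (L - (q+1)) = (q+1) :: List.range' (q+2) (L - (q+2)) := by
                obtain ⟨n, hn⟩ : ∃ n, L - (q+1) = n + 1 := ⟨L - (q+1) - 1, by omega⟩
                rw [hn]
                have hn' : n = L - (q+2) := by omega
                rw [hn', List.range'_succ]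
              rw [this, List.foldl_cons]
              have : pvDnStep cs ((q : Int), true) (q+1) = ((q : Int), false) := by
                simp [pvDnStep, hcq.2]
              rw [this]
            · rw [show L - (q+1) = 0 by omega, show L - (q+2) = 0 by omega]
              simp
          have hq2f : (mc - ((q + 2 : Nat) : Int)).toNat < fuel := by
            have h1 : (p : Int) < mc := hpm
            have h2 : (mc - (p : Int)).toNat < fuel + 1 := hfuel
            omega
          have hih := ih (q+2) (q : Int) (by omega) hq2f
          have hcast : ((q + 2 : Nat) : Int) = f + 2 := by
            push_cast
            rw [hqval]
          have hmain := hih.1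
          have hvals := hih.2
          rw [hcast] at hmain hvals
          have hrec : pvFindLoop text mc "\n\n" 2 fuel (f + 2) ([] ++ [f + 2])
              = [f + 2] ++ pvFindLoop text mc "\n\n" 2 fuel (f + 2) [] := by
            rw [List.nil_append, pvFindLoop_acc]
          simp only [hf, hfm, if_false, or_false, if_neg (by omega : ¬ f = -1)]
          rw [hrec, hsplit, List.foldl_append, hnoop, hstep, List.foldl_cons,
            show pvDnStep cs (d, false) q = ((q : Int), true) by simp [pvDnStep, hcq.1, hcq.2],
            hskip, hmain]
          constructor
          · rcases hlast : (pvFindLoop text mc "\n\n" 2 fuel (f + 2) []).getLast? with _ | v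
            · rw [List.getLast?_append, hlast]
              simp only [Option.none_or, List.getLast?_singleton]
              rw [hqval, Int.add_sub_cancel]
            · rw [List.getLast?_append, hlast]
              simp only [Option.some_or]
          · intro v hv
            rw [List.getLast?_append] at hv
            rcases hlast : (pvFindLoop text mc "\n\n" 2 fuel (f + 2) []).getLast? with _ | v'
            · rw [hlast] at hv
              simp only [Option.none_or, List.getLast?_singleton, Option.some.injEq] at hv
              omega
            · rw [hlast] at hv
              simp only [Option.some_or, Option.some.injEq] at hv
              have := hvals v' hlast
              omega
    · have hLp : L ≤ p := by omega
      simp only [hpm, if_false]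
      rw [show L - p = 0 from by omega]
      simp

theorem pvNl_main (text : String) (mc : Int) :
    ∀ (fuel : Nat) (p : Nat) (d : Int), p ≤ text.toList.length → (mc - p).toNat < fuel →
    ((List.range' p (min text.toList.length (max 0 mc).toNat - p)).foldl
        (pvNlStep text.toList) d)
      = (match (pvFindLoop text mc "\n" 1 fuel (p : Int) []).getLast? with
          | some v => v - 1 | none => d)
    ∧ (∀ v, (pvFindLoop text mc "\n" 1 fuel (p : Int) []).getLast? = some v → 1 ≤ v) := by
  intro fuel
  induction fuel with
  | zero => intro p d _ hf; omega
  | succ fuel ih =>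
    intro p d hk hfuel
    set cs := text.toList with hcs
    set L := min cs.length (max 0 mc).toNat with hL
    have hLle : (L : Int) ≤ max 0 mc := by
      have : L ≤ (max 0 mc).toNat := Nat.min_le_right _ _
      omega
    clear_value L
    simp only [pvFindLoop]
    by_cases hpm : (p : Int) < mc
    · simp only [hpm, if_true]
      simp only [PySem.Str.findFrom_eq, (by decide : "\n".toList = ['\n']), ← hcs]
      by_cases hf : PySem.Chars.findFrom cs ['\n'] (p : Int) none = -1
      · have hno := (PySem.Chars.findFrom_natCast_eq_neg_one_iff cs ['\n'] p hk).mp hf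
        have hnoop : (List.range' p (L - p)).foldl (pvNlStep cs) d = d := by
          apply pvNl_noop
          intro i hi
          have hmem := (List.mem_range'_1).mp hi
          have : ¬ [('\n' : Char)] <+: cs.drop i := pvNoInfix cs ['\n'] p hno i hmem.1
          rw [pvPrefix_one] at this
          exact this
        simp [hf, hnoop]
      · obtain ⟨hpf, hpre, hmin⟩ := PySem.Chars.findFrom_natCast_spec cs ['\n'] p hk hf
        set f := PySem.Chars.findFrom cs ['\n'] (p : Int) none with hfdef
        have hf0 : 0 ≤ f := le_trans (by omega) hpf
        have hfq : f = (f.toNat : Int) := (Int.toNat_of_nonneg hf0).symm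
        set q := f.toNat with hq
        have hqval : (q : Int) = f := by rw [hq]; omega
        clear_value q f
        have hpq : p ≤ q := by omega
        have hcq : cs[q]? = some '\n' := (pvPrefix_one cs q '\n').mp hpre
        have hqlen : q < cs.length := by
          rcases List.getElem?_eq_some_iff.mp hcq with ⟨h, _⟩; exact h
        by_cases hfm : mc ≤ f
        · have hnoop : (List.range' p (L - p)).foldl (pvNlStep cs) d = d := by
            apply pvNl_noop
            intro i hi
            have hmem := (List.mem_range'_1).mp hi
            have hiq : i < q := by omega
            have := hmin i hmem.1 hiq
            rw [pvPrefix_one] at this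
            exact this
          simp [hf, hfm, hnoop]
        · -- a match at q < mc: step there, recurse from q + 1
          have hqm : (q : Int) < mc := by omega
          have hqL : q < L := by omega
          have hsplit : List.range' p (L - p)
              = List.range' p (q - p) ++ List.range' q (L - q) :=
            pvRange'_split p q L hpq (by omega)
          have hnoop : (List.range' p (q - p)).foldl (pvNlStep cs) d = d := by
            apply pvNl_noop
            intro i hi
            have hmem := (List.mem_range'_1).mp hi
            have := hmin i hmem.1 (by omega)
            rw [pvPrefix_one] at this
            exact this
          have hstep : List.range' q (L - q) = q :: List.range' (q+1) (L - (q+1)) := by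
            obtain ⟨n, hn⟩ : ∃ n, L - q = n + 1 := ⟨L - q - 1, by omega⟩
            rw [hn]
            have hn' : n = L - (q+1) := by omega
            rw [hn', List.range'_succ]
          have hq1f : (mc - ((q + 1 : Nat) : Int)).toNat < fuel := by
            have h1 : (p : Int) < mc := hpm
            have h2 : (mc - (p : Int)).toNat < fuel + 1 := hfuel
            omega
          have hih := ih (q+1) (q : Int) (by omega) hq1f
          have hcast : ((q + 1 : Nat) : Int) = f + 1 := by
            push_cast
            rw [hqval]
          have hmain := hih.1
          have hvals := hih.2
          rw [hcast] at hmain hvals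
          have hrec : pvFindLoop text mc "\n" 1 fuel (f + 1) ([] ++ [f + 1])
              = [f + 1] ++ pvFindLoop text mc "\n" 1 fuel (f + 1) [] := by
            rw [List.nil_append, pvFindLoop_acc]
          simp only [hf, hfm, if_false, or_false, if_neg (by omega : ¬ f = -1)]
          rw [hrec, hsplit, List.foldl_append, hnoop, hstep, List.foldl_cons,
            show pvNlStep cs d q = (q : Int) by simp [pvNlStep, hcq], hmain]
          constructor
          · rcases hlast : (pvFindLoop text mc "\n" 1 fuel (f + 1) []).getLast? with _ | v
            · rw [List.getLast?_append, hlast]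
              simp only [Option.none_or, List.getLast?_singleton]
              rw [hqval, Int.add_sub_cancel]
            · rw [List.getLast?_append, hlast]
              simp only [Option.some_or]
          · intro v hv
            rw [List.getLast?_append] at hv
            rcases hlast : (pvFindLoop text mc "\n" 1 fuel (f + 1) []).getLast? with _ | v'
            · rw [hlast] at hv
              simp only [Option.none_or, List.getLast?_singleton, Option.some.injEq] at hv
              omega
            · rw [hlast] at hv
              simp only [Option.some_or, Option.some.injEq] at hv
              have := hvals v' hlast
              omega
    · -- p ≥ max_chars: the loop stops and the scan interval is empty
      have hLp : L ≤ p := by omega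
      simp only [hpm, if_false]
      rw [show L - p = 0 from by omega]
      simp

theorem pvDot_main (text : String) (mc : Int) :
    ∀ (fuel : Nat) (p : Nat) (d : Int), p ≤ text.toList.length → (mc - p).toNat < fuel →
    ((List.range' p (min text.toList.length (max 0 mc).toNat - p)).foldl
        (pvDotStep text.toList) d)
      = (match (pvFindLoop text mc ". " 2 fuel (p : Int) []).getLast? with
          | some v => v - 2 | none => d)
    ∧ (∀ v, (pvFindLoop text mc ". " 2 fuel (p : Int) []).getLast? = some v → 2 ≤ v) := by
  intro fuel
  induction fuel with
  | zero => intro p d _ hf; omega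
  | succ fuel ih =>
    intro p d hk hfuel
    set cs := text.toList with hcs
    set L := min cs.length (max 0 mc).toNat with hL
    have hLle : (L : Int) ≤ max 0 mc := by
      have : L ≤ (max 0 mc).toNat := Nat.min_le_right _ _
      omega
    clear_value L
    simp only [pvFindLoop]
    by_cases hpm : (p : Int) < mc
    · simp only [hpm, if_true]
      simp only [PySem.Str.findFrom_eq, (by decide : ". ".toList = ['.', ' ']), ← hcs]
      by_cases hf : PySem.Chars.findFrom cs ['.', ' '] (p : Int) none = -1
      · have hno := (PySem.Chars.findFrom_natCast_eq_neg_one_iff cs ['.', ' '] p hk).mp hf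
        have hnoop : (List.range' p (L - p)).foldl (pvDotStep cs) d = d := by
          apply pvDot_noop
          intro i hi
          have hmem := (List.mem_range'_1).mp hi
          have := pvNoInfix cs ['.', ' '] p hno i hmem.1
          rw [pvPrefix_two] at this
          exact this
        simp [hf, hnoop]
      · obtain ⟨hpf, hpre, hmin⟩ := PySem.Chars.findFrom_natCast_spec cs ['.', ' '] p hk hf
        set f := PySem.Chars.findFrom cs ['.', ' '] (p : Int) none with hfdef
        have hf0 : 0 ≤ f := le_trans (by omega) hpf
        have hfq : f = (f.toNat : Int) := (Int.toNat_of_nonneg hf0).symm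
        set q := f.toNat with hq
        have hqval : (q : Int) = f := by rw [hq]; omega
        clear_value q f
        have hpq : p ≤ q := by omega
        have hcq := (pvPrefix_two cs q '.' ' ').mp hpre
        have hq1len : q + 1 < cs.length := by
          rcases List.getElem?_eq_some_iff.mp hcq.2 with ⟨h, _⟩; exact h
        by_cases hfm : mc ≤ f
        · have hnoop : (List.range' p (L - p)).foldl (pvDotStep cs) d = d := by
            apply pvDot_noop
            intro i hi
            have hmem := (List.mem_range'_1).mp hi
            have := hmin i hmem.1 (by omega)
            rw [pvPrefix_two] at this
            exact this
          simp [hf, hfm, hnoop]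
        · -- a match at q < mc: step there, recurse from q + 2
          have hqm : (q : Int) < mc := by omega
          have hqL : q < L := by omega
          have hsplit : List.range' p (L - p)
              = List.range' p (q - p) ++ List.range' q (L - q) :=
            pvRange'_split p q L hpq (by omega)
          have hnoop : (List.range' p (q - p)).foldl (pvDotStep cs) d = d := by
            apply pvDot_noop
            intro i hi
            have hmem := (List.mem_range'_1).mp hi
            have := hmin i hmem.1 (by omega)
            rw [pvPrefix_two] at this
            exact this
          have hstep : List.range' q (L - q) = q :: List.range' (q+1) (L - (q+1)) := by
            obtain ⟨n, hn⟩ : ∃ n, L - q = n + 1 := ⟨L - q - 1, by omega⟩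
            rw [hn]
            have hn' : n = L - (q+1) := by omega
            rw [hn', List.range'_succ]
          -- the consumed ' ' at q+1 is skipped by the recursion and is a no-op for the scan
          have hskip : (List.range' (q+1) (L - (q+1))).foldl (pvDotStep cs) (q : Int)
              = (List.range' (q+2) (L - (q+2))).foldl (pvDotStep cs) (q : Int) := by
            by_cases h1 : q + 1 < L
            · have : List.range' (q+1) (L - (q+1)) = (q+1) :: List.range' (q+2) (L - (q+2)) := by
                obtain ⟨n, hn⟩ : ∃ n, L - (q+1) = n + 1 := ⟨L - (q+1) - 1, by omega⟩
                rw [hn]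
                have hn' : n = L - (q+2) := by omega
                rw [hn', List.range'_succ]
              rw [this, List.foldl_cons]
              have : pvDotStep cs (q : Int) (q+1) = (q : Int) := by
                simp [pvDotStep, hcq.2]
              rw [this]
            · rw [show L - (q+1) = 0 by omega, show L - (q+2) = 0 by omega]
              simp
          have hq2f : (mc - ((q + 2 : Nat) : Int)).toNat < fuel := by
            have h1 : (p : Int) < mc := hpm
            have h2 : (mc - (p : Int)).toNat < fuel + 1 := hfuel
            omega
          have hih := ih (q+2) (q : Int) (by omega) hq2f
          have hcast : ((q + 2 : Nat) : Int) = f + 2 := by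
            push_cast
            rw [hqval]
          have hmain := hih.1
          have hvals := hih.2
          rw [hcast] at hmain hvals
          have hrec : pvFindLoop text mc ". " 2 fuel (f + 2) ([] ++ [f + 2])
              = [f + 2] ++ pvFindLoop text mc ". " 2 fuel (f + 2) [] := by
            rw [List.nil_append, pvFindLoop_acc]
          simp only [hf, hfm, if_false, or_false, if_neg (by omega : ¬ f = -1)]
          rw [hrec, hsplit, List.foldl_append, hnoop, hstep, List.foldl_cons,
            show pvDotStep cs d q = (q : Int) by simp [pvDotStep, hcq.1, hcq.2], hskip, hmain]
          constructor
          · rcases hlast : (pvFindLoop text mc ". " 2 fuel (f + 2) []).getLast? with _ | v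
            · rw [List.getLast?_append, hlast]
              simp only [Option.none_or, List.getLast?_singleton]
              rw [hqval, Int.add_sub_cancel]
            · rw [List.getLast?_append, hlast]
              simp only [Option.some_or]
          · intro v hv
            rw [List.getLast?_append] at hv
            rcases hlast : (pvFindLoop text mc ". " 2 fuel (f + 2) []).getLast? with _ | v'
            · rw [hlast] at hv
              simp only [Option.none_or, List.getLast?_singleton, Option.some.injEq] at hv
              omega
            · rw [hlast] at hv
              simp only [Option.some_or, Option.some.injEq] at hv
              have := hvals v' hlast
              omega
    · have hLp : L ≤ p := by omega
      simp only [hpm, if_false]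
      rw [show L - p = 0 from by omega]
      simp

-- ===== VERDICT (by name: the statement is the Claim_ definition above) =====
theorem find_best_split_point_py_spec : Claim_equal_find_best_split_point_py := by
  intro text mc _
  unfold Spec_find_best_split_point_py find_best_split_point_py find_best_split_point_py_alt
  simp only [PySem.Str.len_eq, String.length_toList]
  by_cases hle : (text.length : Int) ≤ mc
  · simp [hle]
  · simp only [hle, if_false]
    have hdn := pvDn_main text mc (mc.toNat + 1) 0 (-1) (by omega) (by omega)
    have hnl := pvNl_main text mc (mc.toNat + 1) 0 (-1) (by omega) (by omega)
    have hdot := pvDot_main text mc (mc.toNat + 1) 0 (-1) (by omega) (by omega)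
    rw [List.range_eq_range']
    rw [pvScan_proj]
    simp only [Nat.sub_zero] at hdn hnl hdot
    obtain ⟨hdn1, hdn2⟩ := hdn
    obtain ⟨hnl1, hnl2⟩ := hnl
    obtain ⟨hdot1, hdot2⟩ := hdot
    simp only [String.length_toList] at hdn1 hnl1 hdot1
    rw [hdn1, hnl1, hdot1]
    rcases h1 : (pvFindLoop text mc "\n\n" 2 (mc.toNat + 1) 0 []).getLast? with _ | v1
    · rcases h2 : (pvFindLoop text mc "\n" 1 (mc.toNat + 1) 0 []).getLast? with _ | v2
      · rcases h3 : (pvFindLoop text mc ". " 2 (mc.toNat + 1) 0 []).getLast? with _ | v3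
        · simp
        · have := hdot2 v3 h3
          simp only [h1, h2, h3]
          have hne : v3 - 2 ≠ -1 := by omega
          simp only [ne_eq, not_true_eq_false, if_false, hne, not_false_eq_true, if_true]
          exact (Int.sub_add_cancel v3 2).symm
      · have := hnl2 v2 h2
        simp only [h1, h2]
        have hne : v2 - 1 ≠ -1 := by omega
        simp only [ne_eq, not_true_eq_false, if_false, hne, not_false_eq_true, if_true]
        exact (Int.sub_add_cancel v2 1).symm
    · have := hdn2 v1 h1
      simp only [h1]
      have hne : v1 - 2 ≠ -1 := by omega
      simp only [ne_eq, not_true_eq_false, if_false, hne, not_false_eq_true, if_true]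
      exact (Int.sub_add_cancel v1 2).symm
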